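-- pv_equiv track=rewrite | github.com/rajulubheem/thrivix | backend/app/services/swarm_dag_adapter.py | detect_agent_dependencies
-- ===== SOURCE A (Python) =====
-- from typing import List, Dict, Any, Optional, Tuple
--
-- def detect_agent_dependencies(agents: List[Dict]) -> Dict[str, List[str]]:
--     """
--     Detect dependencies between agents based on their roles and prompts.
--
--     Returns:
--         Dict mapping agent_id to list of dependency agent_ids
--     """
--     dependencies = {}
--
--     for i, agent in enumerate(agents):
--         agent_id = f"agent_{i}"
--         deps = []
--
--         # Analyze system prompt for dependency keywords
--         prompt_lower = agent.get("system_prompt", "").lower()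
--         name_lower = agent.get("name", "").lower()
--
--         # Special handling for research agents - they can run in parallel
--         if any(word in name_lower for word in ["research", "explore", "investigate", "analyze"]):
--             # Research agents typically don't depend on each other
--             # unless explicitly stated
--             if "synthesize" in prompt_lower or "combine" in prompt_lower:
--                 # This is a synthesizer, depends on all researchers
--                 for j, other in enumerate(agents[:i]):
--                     other_name = other.get("name", "").lower()
--                     if any(word in other_name for word in ["research", "explore", "investigate"]):
--                         deps.append(f"agent_{j}")
--             # Otherwise, research agents are independent
--
--         # Check for explicit synthesis/combination roles
--         elif any(word in prompt_lower for word in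
--                ["synthesize", "combine", "aggregate", "summarize all", "integrate"]):
--             # This agent depends on others
--             # Find which agents it should depend on
--             for j, other in enumerate(agents[:i]):
--                 # Depend on all previous agents that aren't synthesizers
--                 other_prompt = other.get("system_prompt", "").lower()
--                 if not any(word in other_prompt for word in ["synthesize", "combine", "aggregate"]):
--                     deps.append(f"agent_{j}")
--
--         # Check role-based dependencies
--         role = agent.get("role", "").lower()
--         if role in ["validator", "reviewer", "synthesizer", "reporter", "coordinator"]:
--             # These roles typically depend on all previous work
--             if i > 0 and not deps:  # Only if we haven't already set dependencies
--                 deps = [f"agent_{j}" for j in range(i)]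
--         elif role in ["analyzer", "processor"] and "final" in prompt_lower:
--             # Final analyzers depend on everything
--             for j in range(i):
--                 deps.append(f"agent_{j}")
--
--         dependencies[agent_id] = deps
--
--     return dependencies
-- ===== SOURCE B (Python) =====
-- def detect_agent_dependencies(agents):
--     """One pass with running accumulators: instead of rescanning agents[:i]
--     for every synthesizer, keep the prior research-agent ids, the prior
--     non-synthesizer ids and all prior ids as lists built incrementally."""
--     dependencies = {}
--     research_prev = []   # ids of prior agents whose name has research/explore/investigate
--     nonsynth_prev = []   # ids of prior agents whose prompt lacks synthesize/combine/aggregate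
--     all_prev = []        # all prior ids
--     for i, agent in enumerate(agents):
--         agent_id = f"agent_{i}"
--         prompt_lower = agent.get("system_prompt", "").lower()
--         name_lower = agent.get("name", "").lower()
--         role = agent.get("role", "").lower()
--
--         if any(w in name_lower for w in ("research", "explore", "investigate", "analyze")):
--             if "synthesize" in prompt_lower or "combine" in prompt_lower:
--                 deps = list(research_prev)
--             else:
--                 deps = []
--         elif any(w in prompt_lower for w in
--                  ("synthesize", "combine", "aggregate", "summarize all", "integrate")):
--             deps = list(nonsynth_prev)
--         else:
--             deps = []
--
--         if role in ("validator", "reviewer", "synthesizer", "reporter", "coordinator"):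
--             if i > 0 and not deps:
--                 deps = list(all_prev)
--         elif role in ("analyzer", "processor") and "final" in prompt_lower:
--             deps = deps + all_prev
--
--         dependencies[agent_id] = deps
--
--         if any(w in name_lower for w in ("research", "explore", "investigate")):
--             research_prev.append(agent_id)
--         if not any(w in prompt_lower for w in ("synthesize", "combine", "aggregate")):
--             nonsynth_prev.append(agent_id)
--         all_prev.append(agent_id)
--     return dependencies
-- ===== Notes on version B (the rewrite author's own statement) =====
-- stated objective: alternative
-- what changed: Replaces A's per-synthesizer rescans of all earlier agents' names/prompts with a single pass that incrementally maintains three accumulator lists (prior research ids, prior non-synthesizer ids, all prior ids) from which each agent's dependencies are read off directly.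
import Mathlib
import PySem

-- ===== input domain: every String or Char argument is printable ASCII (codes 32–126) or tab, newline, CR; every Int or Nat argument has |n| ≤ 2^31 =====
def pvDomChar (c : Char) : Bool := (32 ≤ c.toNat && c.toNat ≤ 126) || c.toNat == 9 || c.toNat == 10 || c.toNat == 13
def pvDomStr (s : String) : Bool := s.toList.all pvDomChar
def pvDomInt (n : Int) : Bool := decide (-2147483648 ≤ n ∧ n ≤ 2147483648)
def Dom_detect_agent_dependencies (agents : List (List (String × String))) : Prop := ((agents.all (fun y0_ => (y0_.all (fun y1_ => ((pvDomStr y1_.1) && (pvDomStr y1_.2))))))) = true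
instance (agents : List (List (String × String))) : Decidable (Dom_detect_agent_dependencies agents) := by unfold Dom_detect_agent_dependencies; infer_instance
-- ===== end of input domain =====

-- B replaces A's per-synthesizer rescans of all earlier agents with one pass that
-- maintains running accumulator lists (prior research ids, prior non-synthesizer ids,
-- all prior ids); objective: alternative decomposition, same results.

-- shared primitive: agent.get(key, "") on the association list (first match)
def pvAgentGet (agent : List (String × String)) (key : String) : String :=
  PySem.Dict.getD (PySem.Dict.mk agent) key ""

-- shared primitive: f"agent_{i}"
def pvAid (i : Int) : String := "agent_" ++ PySem.Int.toStr i

-- ===== PORT A =====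
-- loop body of A's `for i, agent in enumerate(agents)` (dict state)
def pvStepA (agents : List (List (String × String)))
    (dependencies : PySem.Dict String (List String)) (ia : Int × List (String × String)) :
    PySem.Dict String (List String) :=
  let i := ia.1
  let agent := ia.2
  let agent_id := pvAid i
  let deps : List String := []
  let prompt_lower := PySem.Str.lower (pvAgentGet agent "system_prompt")
  let name_lower := PySem.Str.lower (pvAgentGet agent "name")
  let deps :=
    if (["research", "explore", "investigate", "analyze"].any
          (fun word => PySem.Str.isIn word name_lower)) then
      if PySem.Str.isIn "synthesize" prompt_lower || PySem.Str.isIn "combine" prompt_lower then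
        (PySem.List.enumerate (PySem.List.slice agents none (some i)) 0).foldl
          (fun deps jo =>
            let other_name := PySem.Str.lower (pvAgentGet jo.2 "name")
            if (["research", "explore", "investigate"].any
                  (fun word => PySem.Str.isIn word other_name)) then
              deps ++ [pvAid jo.1]
            else deps) deps
      else deps
    else if (["synthesize", "combine", "aggregate", "summarize all", "integrate"].any
               (fun word => PySem.Str.isIn word prompt_lower)) then
      (PySem.List.enumerate (PySem.List.slice agents none (some i)) 0).foldl
        (fun deps jo =>
          let other_prompt := PySem.Str.lower (pvAgentGet jo.2 "system_prompt")
          if !(["synthesize", "combine", "aggregate"].any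
                 (fun word => PySem.Str.isIn word other_prompt)) then
            deps ++ [pvAid jo.1]
          else deps) deps
    else deps
  let role := PySem.Str.lower (pvAgentGet agent "role")
  let deps :=
    if ["validator", "reviewer", "synthesizer", "reporter", "coordinator"].contains role then
      if i > 0 && deps.isEmpty then (PySem.List.pyRange 0 i 1).map (fun j => pvAid j) else deps
    else if (["analyzer", "processor"].contains role && PySem.Str.isIn "final" prompt_lower) then
      (PySem.List.pyRange 0 i 1).foldl (fun deps j => deps ++ [pvAid j]) deps
    else deps
  dependencies.insert agent_id deps

def detect_agent_dependencies (agents : List (List (String × String))) : List (String × List String) :=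
  ((PySem.List.enumerate agents 0).foldl (pvStepA agents) PySem.Dict.empty).items

-- ===== PORT B =====
-- loop body of B's single pass; state = (dependencies, research_prev, nonsynth_prev, all_prev)
def pvStepB
    (st : PySem.Dict String (List String) × List String × List String × List String)
    (ia : Int × List (String × String)) :
    PySem.Dict String (List String) × List String × List String × List String :=
  let dependencies := st.1
  let research_prev := st.2.1
  let nonsynth_prev := st.2.2.1
  let all_prev := st.2.2.2
  let i := ia.1
  let agent := ia.2
  let agent_id := pvAid i
  let prompt_lower := PySem.Str.lower (pvAgentGet agent "system_prompt")
  let name_lower := PySem.Str.lower (pvAgentGet agent "name")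
  let role := PySem.Str.lower (pvAgentGet agent "role")
  let deps :=
    if (["research", "explore", "investigate", "analyze"].any
          (fun word => PySem.Str.isIn word name_lower)) then
      if PySem.Str.isIn "synthesize" prompt_lower || PySem.Str.isIn "combine" prompt_lower then
        research_prev
      else []
    else if (["synthesize", "combine", "aggregate", "summarize all", "integrate"].any
               (fun word => PySem.Str.isIn word prompt_lower)) then
      nonsynth_prev
    else []
  let deps :=
    if ["validator", "reviewer", "synthesizer", "reporter", "coordinator"].contains role then
      if i > 0 && deps.isEmpty then all_prev else deps
    else if (["analyzer", "processor"].contains role && PySem.Str.isIn "final" prompt_lower) then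
      deps ++ all_prev
    else deps
  let research_prev :=
    if (["research", "explore", "investigate"].any
          (fun word => PySem.Str.isIn word name_lower)) then
      research_prev ++ [agent_id]
    else research_prev
  let nonsynth_prev :=
    if !(["synthesize", "combine", "aggregate"].any
           (fun word => PySem.Str.isIn word prompt_lower)) then
      nonsynth_prev ++ [agent_id]
    else nonsynth_prev
  (dependencies.insert agent_id deps, research_prev, nonsynth_prev, all_prev ++ [agent_id])

def detect_agent_dependencies_alt (agents : List (List (String × String))) : List (String × List String) :=
  (((PySem.List.enumerate agents 0).foldl pvStepB
      (PySem.Dict.empty, [], [], [])).1).items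

-- ===== PRECONDITION & SPEC =====
def Spec_detect_agent_dependencies (agents : List (List (String × String))) (out : List (String × List String)) : Prop := out = detect_agent_dependencies_alt agents
instance (agents : List (List (String × String))) (out : List (String × List String)) : Decidable (Spec_detect_agent_dependencies agents out) := by unfold Spec_detect_agent_dependencies; infer_instance

-- ===== CLAIM (what is proved, stated in full; the proofs are below) =====
def Claim_equal_detect_agent_dependencies : Prop := ∀ (agents : List (List (String × String))), Dom_detect_agent_dependencies agents → Spec_detect_agent_dependencies agents (detect_agent_dependencies agents)

-- ===== LEMMAS AND PROOFS =====

-- ids of research-named agents among a prefix (A's first inner loop over that prefix)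
def pvResIds (pre : List (List (String × String))) : List String :=
  (PySem.List.enumerate pre 0).foldl
    (fun deps jo =>
      let other_name := PySem.Str.lower (pvAgentGet jo.2 "name")
      if (["research", "explore", "investigate"].any
            (fun word => PySem.Str.isIn word other_name)) then
        deps ++ [pvAid jo.1]
      else deps) []

-- ids of non-synthesizer agents among a prefix (A's second inner loop)
def pvNsIds (pre : List (List (String × String))) : List String :=
  (PySem.List.enumerate pre 0).foldl
    (fun deps jo =>
      let other_prompt := PySem.Str.lower (pvAgentGet jo.2 "system_prompt")
      if !(["synthesize", "combine", "aggregate"].any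
             (fun word => PySem.Str.isIn word other_prompt)) then
        deps ++ [pvAid jo.1]
      else deps) []

def pvAllIds (n : Nat) : List String := (PySem.List.pyRange 0 n 1).map (fun j => pvAid j)

theorem pvFoldl_append_map {α β : Type} (f : α → β) :
    ∀ (l : List α) (acc : List β),
      l.foldl (fun acc x => acc ++ [f x]) acc = acc ++ l.map f := by
  intro l
  induction l with
  | nil => intro acc; simp
  | cons a t ih => intro acc; simp [List.foldl_cons, ih]

theorem pvResIds_append (pre : List (List (String × String))) (a : List (String × String)) :
    pvResIds (pre ++ [a])
      = if (["research", "explore", "investigate"].any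
              (fun word => PySem.Str.isIn word (PySem.Str.lower (pvAgentGet a "name")))) then
          pvResIds pre ++ [pvAid pre.length]
        else pvResIds pre := by
  simp only [pvResIds, PySem.List.enumerate_append, List.foldl_append,
    PySem.List.enumerate]
  simp

theorem pvNsIds_append (pre : List (List (String × String))) (a : List (String × String)) :
    pvNsIds (pre ++ [a])
      = if !(["synthesize", "combine", "aggregate"].any
               (fun word => PySem.Str.isIn word (PySem.Str.lower (pvAgentGet a "system_prompt")))) then
          pvNsIds pre ++ [pvAid pre.length]
        else pvNsIds pre := by
  simp only [pvNsIds, PySem.List.enumerate_append, List.foldl_append,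
    PySem.List.enumerate]
  simp

theorem pvAllIds_succ (n : Nat) :
    pvAllIds (n + 1) = pvAllIds n ++ [pvAid n] := by
  simp [pvAllIds, PySem.List.pyRange_one_succ_right]

theorem pvSlice_prefix (pre suf : List (List (String × String))) :
    PySem.List.slice (pre ++ suf) none (some (pre.length : Int)) = pre := by
  simp [PySem.List.slice_to_natCast]

theorem pvStep_eq (pre suf : List (List (String × String))) (a : List (String × String))
    (d : PySem.Dict String (List String)) :
    pvStepB (d, pvResIds pre, pvNsIds pre, pvAllIds pre.length) ((pre.length : Int), a)
      = (pvStepA (pre ++ a :: suf) d ((pre.length : Int), a),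
         pvResIds (pre ++ [a]), pvNsIds (pre ++ [a]), pvAllIds (pre ++ [a]).length) := by
  have hs : PySem.List.slice (pre ++ a :: suf) none (some (pre.length : Int)) = pre :=
    pvSlice_prefix pre (a :: suf)
  simp only [pvStepB, pvStepA, hs, pvResIds_append, pvNsIds_append, List.length_append,
    List.length_cons, List.length_nil, Nat.zero_add, pvAllIds_succ]
  simp only [pvResIds, pvNsIds, pvAllIds]
  simp only [pvFoldl_append_map]

theorem pvMain (suf : List (List (String × String))) :
    ∀ (pre : List (List (String × String))) (d : PySem.Dict String (List String)),
      ((PySem.List.enumerate suf (pre.length : Int)).foldl pvStepB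
          (d, pvResIds pre, pvNsIds pre, pvAllIds pre.length)).1
        = (PySem.List.enumerate suf (pre.length : Int)).foldl (pvStepA (pre ++ suf)) d := by
  induction suf with
  | nil => intro pre d; simp [PySem.List.enumerate]
  | cons a t ih =>
      intro pre d
      rw [PySem.List.enumerate_cons, List.foldl_cons, List.foldl_cons, pvStep_eq pre t a d]
      have hlen : ((pre ++ [a]).length : Int) = (pre.length : Int) + 1 := by
        simp
      have := ih (pre ++ [a]) (pvStepA (pre ++ a :: t) d ((pre.length : Int), a))
      rw [hlen] at this
      rw [this]
      simp

-- ===== VERDICT (by name: the statement is the Claim_ definition above) =====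
theorem detect_agent_dependencies_spec : Claim_equal_detect_agent_dependencies := by
  intro agents _
  unfold Spec_detect_agent_dependencies detect_agent_dependencies detect_agent_dependencies_alt
  have h := pvMain agents [] PySem.Dict.empty
  simp only [List.length_nil, Nat.cast_zero, List.nil_append] at h
  rw [show pvResIds [] = [] from rfl, show pvNsIds [] = [] from rfl,
     show pvAllIds 0 = [] from rfl] at h
  rw [h]
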